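-- pv_equiv track=rewrite | github.com/lulongtw/practice | python/ltc_code/self/CCC '15 J3 - Rövarspråket終於有對的.py | add2
-- ===== SOURCE A (Python) =====
-- vowel = ["a","e","i","o","u"]
--
-- word = ['a', 'b', 'c', 'd', 'e', 'f', 'g', 'h', 'i', 'j', 'k', 'l', 'm', 'n', 'o', 'p', 'q', 'r', 's', 't', 'u', 'v', 'w', 'x', 'y', 'z']
--
-- def add2(ltr) :
--     if ltr == "z" :
--         return "z"
--     else :
--         idx = word.index(ltr) +1
--         while True :
--             if word[idx] in vowel :
--                 idx+=1
--             else :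
--                 break
--         return word[idx]
-- ===== SOURCE B (Python) =====
-- _table = {}
-- _next = "z"
-- for _c in reversed("abcdefghijklmnopqrstuvwxyz"):
--     _table[_c] = _next
--     if _c not in "aeiou":
--         _next = _c
--
-- def add2(ltr):
--     return _table[ltr]
-- ===== Notes on version B (the rewrite author's own statement) =====
-- stated objective: idiomatic
-- what changed: Replaces the per-call index-then-scan over the alphabet list by a module-level table mapping each letter to its next consonant, built once in one reverse pass; add2 becomes a single dict lookup.
import Mathlib
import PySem

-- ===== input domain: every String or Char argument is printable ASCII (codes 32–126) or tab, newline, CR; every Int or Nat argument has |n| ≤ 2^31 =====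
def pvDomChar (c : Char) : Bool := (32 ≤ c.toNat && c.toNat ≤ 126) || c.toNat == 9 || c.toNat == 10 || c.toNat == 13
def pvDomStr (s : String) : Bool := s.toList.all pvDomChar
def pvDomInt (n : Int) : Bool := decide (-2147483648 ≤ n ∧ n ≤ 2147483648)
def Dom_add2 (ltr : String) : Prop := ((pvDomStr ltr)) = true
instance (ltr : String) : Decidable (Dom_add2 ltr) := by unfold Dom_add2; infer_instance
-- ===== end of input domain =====

-- B replaces A's per-call alphabet scan by a next-consonant table built once in a reverse pass (idiomatic lookup).
-- ===== PORT A =====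
def pvVowel : List String := ["a","e","i","o","u"]

def pvWord : List String :=
  ["a","b","c","d","e","f","g","h","i","j","k","l","m","n","o","p","q","r","s","t","u","v","w","x","y","z"]

-- the 'while True' loop of A: advance idx past vowels (fuel bounds the loop; 26 steps always suffice;
-- none = IndexError or fuel exhaustion, neither reachable inside Pre_add2)
def pvLoopA : Nat → Nat → Option Nat
  | 0, _ => none
  | fuel + 1, idx =>
    match pvWord[idx]? with
    | none => none
    | some c => if c ∈ pvVowel then pvLoopA fuel (idx + 1) else some idx

def add2 (ltr : String) : String :=
  if ltr == "z" then "z"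
  else
    match PySem.List.index? pvWord ltr with
    | none => ""            -- ValueError in Python; excluded by Pre_add2
    | some i =>
      match pvLoopA pvWord.length (i + 1) with
      | none => ""          -- IndexError; unreachable inside Pre_add2
      | some j => (pvWord[j]?).getD ""

-- ===== PORT B =====
-- module-level build: walk z→a, remembering the most recent consonant
def pvBuild : PySem.Dict String String × String :=
  (String.toList "abcdefghijklmnopqrstuvwxyz").reverse.foldl
    (fun (st : PySem.Dict String String × String) c =>
      let t := st.1.insert (String.ofList [c]) st.2
      if ¬ (c ∈ String.toList "aeiou") then (t, String.ofList [c]) else (t, st.2))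
    (PySem.Dict.empty, "z")

def pvTable : PySem.Dict String String := pvBuild.1

def add2_alt (ltr : String) : String :=
  (pvTable.get? ltr).getD ""   -- KeyError in Python; excluded by Pre_add2

-- ===== PRECONDITION & SPEC =====
-- Pre_ excludes inputs that are not a lowercase letter: there A raises ValueError (B raises KeyError).
def Pre_add2 (ltr : String) : Prop := ltr ∈ pvWord
instance (ltr : String) : Decidable (Pre_add2 ltr) := by unfold Pre_add2; infer_instance
def pvWitness_add2 : String := "c"

def Spec_add2 (ltr : String) (out : String) : Prop := out = add2_alt ltr
instance (ltr : String) (out : String) : Decidable (Spec_add2 ltr out) := by unfold Spec_add2; infer_instance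

-- ===== CLAIM (what is proved, stated in full; the proofs are below) =====
def Claim_equal_add2 : Prop := ∀ (ltr : String), Dom_add2 ltr → Pre_add2 ltr → Spec_add2 ltr (add2 ltr)

-- ===== LEMMAS AND PROOFS =====

-- one kernel evaluation over the whole 26-letter table instead of 26 separate decides
theorem pv_agree_all : pvWord.all (fun l => add2 l == add2_alt l) = true := by decide

-- ===== VERDICT (by name: the statement is the Claim_ definition above) =====
theorem add2_spec : Claim_equal_add2 := by
  intro ltr _ hpre
  unfold Spec_add2
  exact eq_of_beq (List.all_eq_true.mp pv_agree_all ltr hpre)
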